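-- pv_equiv track=rewrite | github.com/AdamOtto/Daily-Challenges | Challenge1448.py | Solution
-- ===== SOURCE A (Python) =====
-- def Solution(ar):
--     l = len(ar)
--     if l <= 1:
--         if len(ar[0]) == 1:
--             return 1
--         return 0
--     wl = sum(ar[0])
--     retVal = l
--     for i in range(1, wl):
--         temp = 0
--         for j in range(l):
--             if not cleanCut(ar[j], i):
--                 temp += 1
--         if temp < retVal:
--             retVal = temp
--     return retVal
--
-- def cleanCut(ar, cut):
--     s = 0
--     for i in range(len(ar)):
--         s += ar[i]
--         if s == cut:
--             return True
--         elif s > cut: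
--             return False
--     return False
-- ===== SOURCE B (Python) =====
-- def records(row):
--     # strictly increasing record prefix sums of the row (each is a position
--     # where a vertical cut passes cleanly through this row's edge)
--     out = []
--     s = 0
--     best = None
--     for w in row:
--         s += w
--         if best is None or s > best:
--             best = s
--             out.append(s)
--     return out
--
-- def Solution(ar):
--     l = len(ar)
--     if l <= 1:
--         return 1 if len(ar[0]) == 1 else 0
--     wl = sum(ar[0])
--     tally = {}
--     best = 0
--     for row in ar:
--         for s in records(row):
--             if 1 <= s <= wl - 1:
--                 c = tally.get(s, 0) + 1
--                 tally[s] = c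
--                 if c > best:
--                     best = c
--     return l - best
-- ===== Notes on version B (the rewrite author's own statement) =====
-- stated objective: alternative
-- what changed: Instead of testing every cut position 1..width against every row (rescanning each row's prefix sums per position), B computes each row's clean-cut edge positions once (its strictly increasing record prefix sums), tallies them in a dict with a running best count, and returns rows - best.
import Mathlib
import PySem

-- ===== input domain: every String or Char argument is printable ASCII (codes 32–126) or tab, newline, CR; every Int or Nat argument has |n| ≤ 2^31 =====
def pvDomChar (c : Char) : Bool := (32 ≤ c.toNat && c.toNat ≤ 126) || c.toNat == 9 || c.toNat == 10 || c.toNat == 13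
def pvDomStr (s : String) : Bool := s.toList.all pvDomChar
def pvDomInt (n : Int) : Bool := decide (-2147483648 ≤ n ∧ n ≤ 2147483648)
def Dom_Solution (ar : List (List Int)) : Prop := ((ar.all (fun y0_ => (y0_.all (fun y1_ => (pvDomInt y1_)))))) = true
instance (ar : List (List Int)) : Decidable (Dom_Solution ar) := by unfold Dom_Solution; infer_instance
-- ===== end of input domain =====

-- B replaces A's scan of every cut position over every row by a single pass that tallies
-- each row's clean-cut edge positions in a dict with a running best count (rows - best).

-- ===== PORT A =====
-- helper cleanCut: Python's loop over range(len(ar)) with running sum s, ported as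
-- structural recursion over the row carrying the same s
def cleanCutAux (cut : Int) : List Int → Int → Bool
  | [], _ => false
  | x :: rest, s =>
    let s' := s + x
    if s' = cut then true
    else if s' > cut then false
    else cleanCutAux cut rest s'

def cleanCut (row : List Int) (cut : Int) : Bool := cleanCutAux cut row 0

def Solution (ar : List (List Int)) : Int :=
  match ar with
  | [] => 0  -- Python raises IndexError on ar == [] (ar[0]); excluded by Pre_Solution
  | r0 :: _ =>
    if (ar.length : Int) ≤ 1 then
      (if (r0.length : Int) = 1 then 1 else 0)
    else
      let wl := r0.sum
      (PySem.List.pyRange 1 wl 1).foldl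
        (fun retVal i =>
          let temp := ar.foldl (fun temp row => if cleanCut row i then temp else temp + 1) (0 : Int)
          if temp < retVal then temp else retVal)
        (ar.length : Int)

-- ===== PORT B =====
-- helper records: strictly increasing record prefix sums of a row
def recordsAux : List Int → Int → Option Int → List Int
  | [], _, _ => []
  | x :: rest, s, best =>
    let s' := s + x
    match best with
    | none => s' :: recordsAux rest s' (some s')
    | some b => if s' > b then s' :: recordsAux rest s' (some s') else recordsAux rest s' (some b)

def records (row : List Int) : List Int := recordsAux row 0 none

def Solution_alt (ar : List (List Int)) : Int :=
  match ar with
  | [] => 0  -- Python B raises IndexError on ar == [] too; excluded by Pre_Solution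
  | r0 :: _ =>
    if (ar.length : Int) ≤ 1 then
      (if (r0.length : Int) = 1 then 1 else 0)
    else
      let wl := r0.sum
      let st := ar.foldl
        (fun st row =>
          (records row).foldl
            (fun st s =>
              if 1 ≤ s ∧ s ≤ wl - 1 then
                let c := st.1.getD s 0 + 1
                (st.1.insert s c, if c > st.2 then c else st.2)
              else st)
            st)
        ((PySem.Dict.empty : PySem.Dict Int Int), (0 : Int))
      (ar.length : Int) - st.2

-- ===== PRECONDITION & SPEC =====
-- Pre_ excludes only ar = [], on which Python A raises IndexError at ar[0].
def Pre_Solution (ar : List (List Int)) : Prop := ar ≠ []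
instance (ar : List (List Int)) : Decidable (Pre_Solution ar) := by unfold Pre_Solution; infer_instance

def pvWitness_Solution : List (List Int) := [[1, 2], [2, 1]]

def Spec_Solution (ar : List (List Int)) (out : Int) : Prop := out = Solution_alt ar
instance (ar : List (List Int)) (out : Int) : Decidable (Spec_Solution ar out) := by unfold Spec_Solution; infer_instance

-- ===== CLAIM (what is proved, stated in full; the proofs are below) =====
def Claim_equal_Solution : Prop := ∀ (ar : List (List Int)), Dom_Solution ar → Pre_Solution ar → Spec_Solution ar (Solution ar)

-- ===== LEMMAS AND PROOFS =====

-- every element recorded with a known lower bound exceeds that bound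
theorem recordsAux_gt (row : List Int) : ∀ (s b c : Int), c ∈ recordsAux row s (some b) → b < c := by
  induction row with
  | nil => intro s b c h; simp [recordsAux] at h
  | cons x rest ih =>
    intro s b c h
    simp only [recordsAux] at h
    by_cases hgt : s + x > b
    · simp [hgt] at h
      rcases h with h | h
      · omega
      · have := ih (s + x) (s + x) c h; omega
    · simp [hgt] at h
      exact ih (s + x) b c h

-- cleanCut from the same running sum sees exactly the recorded positions (bounded case)
theorem cleanCutAux_eq_mem_some (row : List Int) :
    ∀ (s b c : Int), b < c → (cleanCutAux c row s = true ↔ c ∈ recordsAux row s (some b)) := by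
  induction row with
  | nil => intro s b c _; simp [cleanCutAux, recordsAux]
  | cons x rest ih =>
    intro s b c hbc
    simp only [cleanCutAux, recordsAux]
    by_cases he : s + x = c
    · rw [if_pos he, if_pos (show s + x > b by omega), he]
      simp
    · rw [if_neg he]
      by_cases hg : s + x > c
      · rw [if_pos hg, if_pos (show s + x > b by omega)]
        simp only [Bool.false_eq_true, false_iff, List.mem_cons]
        rintro (h | h)
        · omega
        · exact absurd (recordsAux_gt rest (s + x) (s + x) c h) (by omega)
      · rw [if_neg hg]
        by_cases hgt : s + x > b
        · rw [if_pos hgt]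
          simp only [List.mem_cons]
          rw [ih (s + x) (s + x) c (by omega)]
          constructor
          · exact Or.inr
          · rintro (h | h)
            · omega
            · exact h
        · rw [if_neg hgt]
          exact ih (s + x) b c hbc

-- the unbounded (first-prefix) case
theorem cleanCut_iff_mem_records (row : List Int) (c : Int) :
    cleanCut row c = true ↔ c ∈ records row := by
  unfold cleanCut records
  cases row with
  | nil => simp [cleanCutAux, recordsAux]
  | cons x rest =>
    simp only [cleanCutAux, recordsAux]
    by_cases he : 0 + x = c
    · rw [if_pos he]
      simp [he]
    · rw [if_neg he]
      by_cases hg : 0 + x > c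
      · rw [if_pos hg]
        simp only [Bool.false_eq_true, false_iff, List.mem_cons]
        rintro (h | h)
        · omega
        · exact absurd (recordsAux_gt rest (0 + x) (0 + x) c h) (by omega)
      · rw [if_neg hg]
        simp only [List.mem_cons]
        rw [cleanCutAux_eq_mem_some rest (0 + x) (0 + x) c (by omega)]
        constructor
        · exact Or.inr
        · rintro (h | h)
          · omega
          · exact h

theorem recordsAux_nodup (row : List Int) : ∀ (s : Int) (o : Option Int), (recordsAux row s o).Nodup := by
  induction row with
  | nil => intro s o; simp [recordsAux]
  | cons x rest ih =>
    intro s o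
    simp only [recordsAux]
    cases o with
    | none =>
      refine List.nodup_cons.2 ⟨?_, ih _ _⟩
      intro h; exact absurd (recordsAux_gt rest (s + x) (s + x) (s + x) h) (by omega)
    | some b =>
      by_cases hgt : s + x > b
      · simp only [if_pos hgt]
        refine List.nodup_cons.2 ⟨?_, ih _ _⟩
        intro h; exact absurd (recordsAux_gt rest (s + x) (s + x) (s + x) h) (by omega)
      · simp only [if_neg hgt]; exact ih _ _

theorem count_records (row : List Int) (c : Int) :
    (records row).count c = if cleanCut row c then 1 else 0 := by
  by_cases h : cleanCut row c = true
  · rw [if_pos h]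
    exact List.count_eq_one_of_mem (recordsAux_nodup row 0 none) ((cleanCut_iff_mem_records row c).1 h)
  · rw [if_neg h]
    exact List.count_eq_zero.2 (fun hm => h ((cleanCut_iff_mem_records row c).2 hm))

-- the filtered stream of all rows' clean-cut positions
def cutStream (ar : List (List Int)) (wl : Int) : List Int :=
  (ar.flatMap records).filter (fun s => decide (1 ≤ s ∧ s ≤ wl - 1))

theorem count_cutStream (ar : List (List Int)) (wl i : Int) (h1 : 1 ≤ i) (h2 : i ≤ wl - 1) :
    (cutStream ar wl).count i = ar.countP (fun row => cleanCut row i) := by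
  unfold cutStream
  rw [List.count_filter (by simp [h1, h2])]
  induction ar with
  | nil => simp
  | cons r rest ih =>
    simp only [List.flatMap_cons, List.count_append, List.countP_cons, ih, count_records]
    by_cases h : cleanCut r i = true <;> simp [h] <;> omega

-- A's inner loop counts the rows the cut does NOT pass cleanly through
theorem foldA_inner (ar : List (List Int)) (i : Int) : ∀ (t : Int),
    ar.foldl (fun temp row => if cleanCut row i then temp else temp + 1) t
      = t + ((ar.countP (fun row => !cleanCut row i) : Nat) : Int) := by
  induction ar with
  | nil => intro t; simp
  | cons r rest ih =>
    intro t
    simp only [List.foldl_cons, List.countP_cons, ih]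
    by_cases h : cleanCut r i = true <;> simp [h] <;> omega

-- A's outer min-loop is l minus a running max of the clean counts
theorem foldA_outer (L : List Int) (l : Int) (f c : Int → Int)
    (hf : ∀ i ∈ L, f i = l - c i) : ∀ (m : Int),
    L.foldl (fun r i => if f i < r then f i else r) (l - m)
      = l - L.foldl (fun m i => max m (c i)) m := by
  induction L with
  | nil => intro m; simp
  | cons i rest ih =>
    intro m
    simp only [List.foldl_cons]
    have hfi : f i = l - c i := hf i (List.mem_cons_self ..)
    by_cases h : f i < l - m
    · rw [if_pos h, hfi, show l - c i = l - max m (c i) by omega]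
      exact ih (fun j hj => hf j (List.mem_cons_of_mem _ hj)) _
    · rw [if_neg h, show (l - m) = l - max m (c i) by omega]
      exact ih (fun j hj => hf j (List.mem_cons_of_mem _ hj)) _

theorem foldl_max_proj_le (f : Int → Int) (L : List Int) (b : Int) : ∀ (a : Int), a ≤ b →
    (∀ x ∈ L, f x ≤ b) → L.foldl (fun m i => max m (f i)) a ≤ b := by
  induction L with
  | nil => intro a ha _; exact ha
  | cons i rest ih =>
    intro a ha hb
    simp only [List.foldl_cons]
    exact ih _ (by have := hb i (List.mem_cons_self ..); omega)
      (fun x hx => hb x (List.mem_cons_of_mem _ hx))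

-- invariant of B's tally loop over the flattened filtered stream
def InvB (P : List Int) (st : PySem.Dict Int Int × Int) : Prop :=
  (∀ s : Int, st.1.getD s 0 = (P.count s : Int)) ∧ 0 ≤ st.2 ∧
  (∀ s : Int, (P.count s : Int) ≤ st.2) ∧ (st.2 = 0 ∨ ∃ s ∈ P, st.2 = ((P.count s : Nat) : Int))

theorem invB_step (P : List Int) (st : PySem.Dict Int Int × Int) (q : Int) (h : InvB P st) :
    InvB (P ++ [q]) (st.1.insert q (st.1.getD q 0 + 1),
      if st.1.getD q 0 + 1 > st.2 then st.1.getD q 0 + 1 else st.2) := by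
  obtain ⟨hd, hb0, hble, hbmem⟩ := h
  have hcnt : ∀ s : Int, ((P ++ [q]).count s : Int)
      = (P.count s : Int) + (if s = q then 1 else 0) := by
    intro s
    by_cases hs : s = q <;> simp [List.count_append, hs, List.count_singleton] <;> omega
  refine ⟨?_, ?_, ?_, ?_⟩
  · intro s
    rw [PySem.Dict.getD_insert, hcnt]
    by_cases hs : s = q <;> simp [hs, hd]
  · dsimp only; split <;> omega
  · intro s
    rw [hcnt s]
    have h1 := hble s
    have h2 := hd q
    have h3 := hble q
    dsimp only
    by_cases hs : s = q
    · rw [if_pos hs, hs]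
      split <;> omega
    · rw [if_neg hs]
      split <;> omega
  · dsimp only
    by_cases hgt : st.1.getD q 0 + 1 > st.2
    · rw [if_pos hgt]
      right
      exact ⟨q, by simp, by rw [hcnt q, hd q]; simp⟩
    · rw [if_neg hgt]
      rcases hbmem with hz | ⟨s, hs, hv⟩
      · left; exact hz
      · right
        refine ⟨s, List.mem_append_left _ hs, ?_⟩
        have hsq : s ≠ q := by
          intro he
          rw [he] at hv
          have := hd q
          omega
        rw [hcnt s, if_neg hsq, hv]; omega

theorem invB_foldl (Q : List Int) : ∀ (P : List Int) (st : PySem.Dict Int Int × Int), InvB P st →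
    InvB (P ++ Q) (Q.foldl (fun st q =>
      (st.1.insert q (st.1.getD q 0 + 1), if st.1.getD q 0 + 1 > st.2 then st.1.getD q 0 + 1 else st.2)) st) := by
  induction Q with
  | nil => intro P st h; simpa using h
  | cons q rest ih =>
    intro P st h
    have := ih (P ++ [q]) _ (invB_step P st q h)
    simpa using this

-- B's nested loops are the unguarded tally step folded over the filtered stream
theorem foldB_eq_stream (ar : List (List Int)) (wl : Int) :
    ∀ (st : PySem.Dict Int Int × Int),
    ar.foldl (fun st row =>
        (records row).foldl (fun st s =>
          if 1 ≤ s ∧ s ≤ wl - 1 then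
            (st.1.insert s (st.1.getD s 0 + 1), if st.1.getD s 0 + 1 > st.2 then st.1.getD s 0 + 1 else st.2)
          else st) st) st
      = (cutStream ar wl).foldl (fun st q =>
          (st.1.insert q (st.1.getD q 0 + 1), if st.1.getD q 0 + 1 > st.2 then st.1.getD q 0 + 1 else st.2)) st := by
  induction ar with
  | nil => intro st; simp [cutStream]
  | cons r rest ih =>
    intro st
    have hrow : ∀ (st' : PySem.Dict Int Int × Int),
        (records r).foldl (fun st s =>
          if 1 ≤ s ∧ s ≤ wl - 1 then
            (st.1.insert s (st.1.getD s 0 + 1), if st.1.getD s 0 + 1 > st.2 then st.1.getD s 0 + 1 else st.2)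
          else st) st'
        = ((records r).filter (fun s => decide (1 ≤ s ∧ s ≤ wl - 1))).foldl (fun st q =>
            (st.1.insert q (st.1.getD q 0 + 1), if st.1.getD q 0 + 1 > st.2 then st.1.getD q 0 + 1 else st.2)) st' := by
      intro st'
      rw [List.foldl_filter]
      simp only [decide_eq_true_eq]
    have hsplit : cutStream (r :: rest) wl
        = (records r).filter (fun s => decide (1 ≤ s ∧ s ≤ wl - 1)) ++ cutStream rest wl := by
      simp [cutStream]
    rw [List.foldl_cons, hsplit, List.foldl_append, hrow]
    exact ih _

-- count of rows a cut i in [1, wl-1] passes cleanly through, as an Int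
theorem countP_clean_eq_stream (ar : List (List Int)) (wl i : Int) (h1 : 1 ≤ i) (h2 : i ≤ wl - 1) :
    ((ar.countP (fun row => cleanCut row i) : Nat) : Int) = (((cutStream ar wl).count i : Nat) : Int) := by
  rw [count_cutStream ar wl i h1 h2]

-- ===== VERDICT (by name: the statement is the Claim_ definition above) =====
theorem Solution_spec : Claim_equal_Solution := by
  intro ar _ hpre
  unfold Spec_Solution
  cases ar with
  | nil => exact absurd rfl hpre
  | cons r0 rest =>
    cases rest with
    | nil => simp [Solution, Solution_alt]
    | cons r1 rest' =>
      have hlen : ¬ (((r0 :: r1 :: rest').length : Nat) : Int) ≤ 1 := by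
        simp only [List.length_cons]
        push_cast
        omega
      simp only [Solution, Solution_alt, if_neg hlen]
      set A := r0 :: r1 :: rest' with hA
      set l : Int := ((A.length : Nat) : Int) with hl
      set wl : Int := r0.sum with hwl
      set L := PySem.List.pyRange 1 wl 1 with hL
      set c : Int → Int := fun i => ((A.countP (fun row => cleanCut row i) : Nat) : Int) with hc
      -- A's value
      have hAval : L.foldl
          (fun retVal i =>
            if A.foldl (fun temp row => if cleanCut row i then temp else temp + 1) 0 < retVal then
              A.foldl (fun temp row => if cleanCut row i then temp else temp + 1) 0
            else retVal) l
          = l - L.foldl (fun m i => max m (c i)) 0 := by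
        have hf : ∀ i ∈ L, A.foldl (fun temp row => if cleanCut row i then temp else temp + 1) 0
            = l - c i := by
          intro i _
          rw [foldA_inner A i 0, hc, hl]
          dsimp only
          have hlen2 : A.length
              = A.countP (fun row => cleanCut row i) + A.countP (fun row => !cleanCut row i) := by
            simpa using List.length_eq_countP_add_countP (p := fun row => cleanCut row i) (l := A)
          omega
        have := foldA_outer L l _ c hf 0
        rw [show l - 0 = l by omega] at this
        exact this
      rw [hAval, foldB_eq_stream]
      -- B's invariant at the end of the stream
      have h0 : InvB [] ((PySem.Dict.empty : PySem.Dict Int Int), (0 : Int)) := by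
        refine ⟨fun s => by simp [PySem.Dict.getD_empty], le_refl 0, fun s => by simp, Or.inl rfl⟩
      have hInv := invB_foldl (cutStream A wl) [] _ h0
      rw [List.nil_append] at hInv
      set st := (cutStream A wl).foldl
          (fun st q => (st.1.insert q (st.1.getD q 0 + 1),
            if st.1.getD q 0 + 1 > st.2 then st.1.getD q 0 + 1 else st.2))
          ((PySem.Dict.empty : PySem.Dict Int Int), (0 : Int)) with hst
      obtain ⟨_, hb0, hble, hbmem⟩ := hInv
      have hMB : L.foldl (fun m i => max m (c i)) 0 = st.2 := by
        apply le_antisymm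
        · apply foldl_max_proj_le c L st.2 0 hb0
          intro i hiL
          have hi := (PySem.List.mem_pyRange_one).1 (hL ▸ hiL)
          rw [hc]
          dsimp only
          rw [countP_clean_eq_stream A wl i hi.1 (by omega)]
          exact hble i
        · rcases hbmem with hz | ⟨s, hs, hv⟩
          · rw [hz]
            exact (PySem.List.le_foldl_max_int L c 0).1
          · have hmem := List.mem_filter.1 hs
            have hrange : 1 ≤ s ∧ s ≤ wl - 1 := by
              have := hmem.2
              simpa using this
            have hsL : s ∈ L := by
              rw [hL, PySem.List.mem_pyRange_one]
              omega
            have hcs : st.2 = c s := by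
              rw [hv, hc]
              dsimp only
              rw [countP_clean_eq_stream A wl s hrange.1 hrange.2]
            rw [hcs]
            exact (PySem.List.le_foldl_max_int L c 0).2 s hsL
      rw [hMB]
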